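-- pv_equiv track=rewrite | github.com/kanitsch/ASD | egzamin/B/egz1b.py | kstrong_brut
-- ===== SOURCE A (Python) =====
-- def kstrong_brut( T, k):
--   # tu prosze wpisac wlasna implementacje
--   n=len(T)
--   maxsum=0
--   for i in range(n-1):
--     for j in range(i+1,n+1):
--       suma=0
--       t=T[i:j]
--       t.sort()
--       x=0
--       while x<k and x<len(t) and t[x]<0:
--         x+=1
--       while x<len(t):
--             suma+=t[x]
--             x+=1
--       maxsum=max(suma,maxsum)
--
--
--
--
--   return maxsum
-- ===== SOURCE B (Python) =====
-- def kstrong_brut(T, k):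
--   n = len(T)
--   best = 0
--   for i in range(n - 1):
--     total = 0
--     removed = []       # sorted ascending: the up-to-k most negative elements of T[i:j+1]
--     removed_sum = 0
--     for j in range(i, n):
--       x = T[j]
--       total += x
--       if x < 0:
--         p = 0
--         while p < len(removed) and removed[p] <= x:
--           p += 1
--         removed.insert(p, x)
--         removed_sum += x
--         if len(removed) > k:
--           removed_sum -= removed.pop()
--       s = total - removed_sum
--       if s > best:
--         best = s
--   return best
-- ===== Notes on version B (the rewrite author's own statement) =====
-- stated objective: faster
-- what changed: Instead of slicing, sorting and rescanning every subarray T[i:j] (O(n^3 log n)), B extends each window one element at a time per start index, maintaining a running sum plus a small sorted list of the at-most-k most negative elements seen, so no subarray is ever re-sorted.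
import Mathlib
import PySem

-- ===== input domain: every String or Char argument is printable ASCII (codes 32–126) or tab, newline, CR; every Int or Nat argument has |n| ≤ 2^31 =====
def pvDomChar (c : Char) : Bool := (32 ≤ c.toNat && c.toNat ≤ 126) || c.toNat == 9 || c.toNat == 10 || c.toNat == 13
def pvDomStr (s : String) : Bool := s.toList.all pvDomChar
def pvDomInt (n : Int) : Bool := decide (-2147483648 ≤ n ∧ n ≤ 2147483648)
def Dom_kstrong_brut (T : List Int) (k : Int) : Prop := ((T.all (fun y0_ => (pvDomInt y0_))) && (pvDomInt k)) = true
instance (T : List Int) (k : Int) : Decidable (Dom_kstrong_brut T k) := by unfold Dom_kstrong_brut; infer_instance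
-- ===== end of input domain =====

-- B replaces A's slice-then-sort scan of every subarray by, per start index, one incremental
-- extension of the window that maintains a running sum plus the sorted list of the at-most-k
-- most negative elements; objective: faster (no re-sorting of each of the O(n^2) subarrays).

-- ===== PORT A =====
-- while x < k and x < len(t) and t[x] < 0: x += 1
def pvSkipA (t : List Int) (k : Int) (x : Int) : Int :=
  if h : x < k ∧ x < (t.length : Int) ∧ PySem.List.pyGetD t x 0 < 0 then
    pvSkipA t k (x + 1)
  else x
termination_by ((t.length : Int) - x).toNat
decreasing_by omega

-- while x < len(t): suma += t[x]; x += 1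
def pvSumA (t : List Int) (x : Int) (suma : Int) : Int :=
  if _h : x < (t.length : Int) then pvSumA t (x + 1) (suma + PySem.List.pyGetD t x 0) else suma
termination_by ((t.length : Int) - x).toNat
decreasing_by omega

def kstrong_brut (T : List Int) (k : Int) : Int :=
  let n : Int := T.length
  (PySem.List.pyRange 0 (n - 1) 1).foldl (fun maxsum i =>
    (PySem.List.pyRange (i + 1) (n + 1) 1).foldl (fun maxsum j =>
      let t := PySem.List.sorted (PySem.List.slice T (some i) (some j)) (fun y => y) false
      let x := pvSkipA t k 0
      let suma := pvSumA t x 0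
      max suma maxsum) maxsum) 0

-- ===== PORT B =====
-- while p < len(removed) and removed[p] <= x: p += 1
def pvPosB (removed : List Int) (x : Int) (p : Int) : Int :=
  if h : p < (removed.length : Int) ∧ PySem.List.pyGetD removed p 0 ≤ x then
    pvPosB removed x (p + 1)
  else p
termination_by ((removed.length : Int) - p).toNat
decreasing_by omega

-- body of B's inner loop; state = (total, removed, removed_sum, best)
def pvStepB (T : List Int) (k : Int) (st : Int × List Int × Int × Int) (j : Int) :
    Int × List Int × Int × Int :=
  match st with
  | (total, removed, rsum, best) =>
    let x := PySem.List.pyGetD T j 0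
    let total := total + x
    let rr : List Int × Int :=
      if x < 0 then
        let p := pvPosB removed x 0
        let removed := PySem.List.insert removed p x
        let rsum := rsum + x
        if (removed.length : Int) > k then
          match PySem.List.pop? removed (-1) with
          | some (v, rest) => (rest, rsum - v)
          | none => (removed, rsum)
        else (removed, rsum)
      else (removed, rsum)
    let s := total - rr.2
    (total, rr.1, rr.2, if s > best then s else best)


def kstrong_brut_alt (T : List Int) (k : Int) : Int :=
  let n : Int := T.length
  (PySem.List.pyRange 0 (n - 1) 1).foldl (fun best i =>
    ((PySem.List.pyRange i n 1).foldl (pvStepB T k) (0, [], 0, best)).2.2.2) 0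

-- ===== PRECONDITION & SPEC =====
def Spec_kstrong_brut (T : List Int) (k : Int) (out : Int) : Prop := out = kstrong_brut_alt T k
instance (T : List Int) (k : Int) (out : Int) : Decidable (Spec_kstrong_brut T k out) := by unfold Spec_kstrong_brut; infer_instance

-- ===== CLAIM (what is proved, stated in full; the proofs are below) =====
def Claim_equal_kstrong_brut : Prop := ∀ (T : List Int) (k : Int), Dom_kstrong_brut T k → Spec_kstrong_brut T k (kstrong_brut T k)

-- ===== LEMMAS AND PROOFS =====

def pvSkipCount : List Int → Int → Nat
  | [], _ => 0
  | a :: l, m => if 0 < m ∧ a < 0 then pvSkipCount l (m - 1) + 1 else 0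
def pvIns (x : Int) : List Int → List Int
  | [] => [x]
  | b :: l => if b ≤ x then b :: pvIns x l else x :: b :: l
def pvPosN (x : Int) : List Int → Nat
  | [] => 0
  | b :: l => if b ≤ x then pvPosN x l + 1 else 0

def pvNegs (w : List Int) : List Int := w.filter (fun y => decide (y < 0))
def pvSrt (l : List Int) : List Int := PySem.List.sorted l (fun y => y) false
def pvRem (w : List Int) (k : Int) : List Int := (pvSrt (pvNegs w)).take k.toNat
def pvVal (w : List Int) (k : Int) : Int := w.sum - (pvRem w k).sum

lemma pvSkipA_eq (t : List Int) (k : Int) (x : Int) (hx : 0 ≤ x) :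
    pvSkipA t k x = x + pvSkipCount (t.drop x.toNat) (k - x) := by
  rw [pvSkipA]
  by_cases hlen : x < (t.length : Int)
  · have hget : PySem.List.pyGetD t x 0 = t[x.toNat] :=
      PySem.List.pyGetD_eq_getElem t 0 hx hlen
    have hlt : x.toNat < t.length := by omega
    have hd : t.drop x.toNat = t[x.toNat] :: t.drop (x.toNat + 1) :=
      List.drop_eq_getElem_cons hlt
    rw [hd, pvSkipCount]
    by_cases hc : x < k ∧ t[x.toNat] < 0
    · rw [dif_pos ⟨hc.1, hlen, hget ▸ hc.2⟩,
        pvSkipA_eq t k (x + 1) (by omega), if_pos ⟨by omega, hc.2⟩]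
      have : (x + 1).toNat = x.toNat + 1 := by omega
      rw [this]; push_cast; ring_nf
    · rw [if_neg (fun hh => hc ⟨by omega, hh.2⟩),
        dif_neg (fun hh => hc ⟨hh.1, hget ▸ hh.2.2⟩)]
      simp
  · have hnil : t.drop x.toNat = [] := List.drop_eq_nil_of_le (by omega)
    rw [dif_neg (fun hh => hlen hh.2.1), hnil]
    simp [pvSkipCount]
termination_by ((t.length : Int) - x).toNat
decreasing_by omega

lemma pvSumA_eq (t : List Int) (x : Int) (s : Int) (hx : 0 ≤ x) :
    pvSumA t x s = s + (t.drop x.toNat).sum := by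
  rw [pvSumA]
  by_cases hlen : x < (t.length : Int)
  · have hget : PySem.List.pyGetD t x 0 = t[x.toNat] :=
      PySem.List.pyGetD_eq_getElem t 0 hx hlen
    have hd : t.drop x.toNat = t[x.toNat] :: t.drop (x.toNat + 1) :=
      List.drop_eq_getElem_cons (by omega)
    rw [dif_pos hlen, pvSumA_eq t (x + 1) _ (by omega), hd, hget]
    have : (x + 1).toNat = x.toNat + 1 := by omega
    rw [this, List.sum_cons]; ring
  · have : t.drop x.toNat = [] := List.drop_eq_nil_of_le (by omega)
    rw [this, dif_neg hlen]; simp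
termination_by ((t.length : Int) - x).toNat
decreasing_by omega

lemma pvPosB_eq (l : List Int) (x : Int) (p : Int) (hp : 0 ≤ p) :
    pvPosB l x p = p + pvPosN x (l.drop p.toNat) := by
  rw [pvPosB]
  by_cases hlen : p < (l.length : Int)
  · have hget : PySem.List.pyGetD l p 0 = l[p.toNat] :=
      PySem.List.pyGetD_eq_getElem l 0 hp hlen
    have hd : l.drop p.toNat = l[p.toNat] :: l.drop (p.toNat + 1) :=
      List.drop_eq_getElem_cons (by omega)
    rw [hd, pvPosN]
    by_cases hc : l[p.toNat] ≤ x
    · rw [dif_pos ⟨hlen, hget ▸ hc⟩, pvPosB_eq l x (p + 1) (by omega), if_pos hc]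
      have : (p + 1).toNat = p.toNat + 1 := by omega
      rw [this]; push_cast; ring_nf
    · rw [if_neg hc, dif_neg (by rw [hget]; tauto)]; omega
  · have : l.drop p.toNat = [] := List.drop_eq_nil_of_le (by omega)
    rw [this, dif_neg (by tauto)]
    simp [pvPosN]
termination_by ((l.length : Int) - p).toNat
decreasing_by omega

lemma pvPosN_le (x : Int) (l : List Int) : pvPosN x l ≤ l.length := by
  induction l with
  | nil => simp [pvPosN]
  | cons b l ih => simp only [pvPosN, List.length_cons]; split <;> omega

lemma pvIns_eq_take_drop (x : Int) (l : List Int) :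
    pvIns x l = l.take (pvPosN x l) ++ x :: l.drop (pvPosN x l) := by
  induction l with
  | nil => simp [pvIns, pvPosN]
  | cons b l ih =>
    simp only [pvIns, pvPosN]
    split
    · simp [ih]
    · simp

lemma pvPosB_insert (l : List Int) (x : Int) :
    PySem.List.insert l (pvPosB l x 0) x = pvIns x l := by
  have h0 : pvPosB l x 0 = ((pvPosN x l : Nat) : Int) := by
    rw [pvPosB_eq l x 0 le_rfl]; simp
  rw [h0, PySem.List.insert_natCast l _ x (pvPosN_le x l), pvIns_eq_take_drop]


lemma pvSrt_perm (l : List Int) : (pvSrt l).Perm l := PySem.List.sorted_perm l _ _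
lemma pvSrt_pairwise (l : List Int) : (pvSrt l).Pairwise (· ≤ ·) := by
  have := PySem.List.sorted_pairwise l (fun y => y) 
  exact this

lemma pvSrt_split (w : List Int) :
    pvSrt w = pvSrt (pvNegs w) ++ pvSrt (w.filter (fun y => !decide (y < 0))) := by
  apply PySem.List.sorted_id_eq_of_perm_of_pairwise
  · exact ((pvSrt_perm (pvNegs w)).append (pvSrt_perm _)).trans (List.filter_append_perm _ w)
  · apply List.pairwise_append.2
    refine ⟨pvSrt_pairwise _, pvSrt_pairwise _, ?_⟩
    intro a ha b hb
    have ha' : a ∈ pvNegs w := ((PySem.List.mem_sorted _ _ _ _).1 ha)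
    have hb' : b ∈ w.filter (fun y => !decide (y < 0)) := ((PySem.List.mem_sorted _ _ _ _).1 hb)
    have h1 : a < 0 := by simpa [pvNegs] using (List.mem_filter.1 ha').2
    have h2 : ¬ b < 0 := by simpa using (List.mem_filter.1 hb').2
    omega

lemma pvIns_perm (x : Int) (l : List Int) : (pvIns x l).Perm (x :: l) := by
  induction l with
  | nil => simp [pvIns]
  | cons b l ih =>
    simp only [pvIns]
    split
    · exact (List.Perm.cons b ih).trans (List.Perm.swap x b l)
    · rfl

lemma pvIns_pairwise (x : Int) (l : List Int) (h : l.Pairwise (· ≤ ·)) :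
    (pvIns x l).Pairwise (· ≤ ·) := by
  induction l with
  | nil => simp [pvIns]
  | cons b l ih =>
    rw [List.pairwise_cons] at h
    simp only [pvIns]
    split
    · rename_i hbx
      rw [List.pairwise_cons]
      refine ⟨?_, ih h.2⟩
      intro a ha
      have ha2 := (pvIns_perm x l).mem_iff.1 ha
      rcases List.mem_cons.1 ha2 with h1 | h1
      · subst h1; omega
      · exact h.1 a h1
    · rename_i hbx
      rw [List.pairwise_cons]
      refine ⟨?_, List.pairwise_cons.2 h⟩
      intro a ha
      rcases List.mem_cons.1 ha with h' | h''
      · omega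
      · have := h.1 a h''; omega

lemma length_pvIns (x : Int) (l : List Int) : (pvIns x l).length = l.length + 1 :=
  (pvIns_perm x l).length_eq

lemma sum_pvIns (x : Int) (l : List Int) : (pvIns x l).sum = x + l.sum := by
  have := (pvIns_perm x l).sum_eq
  simpa using this

lemma take_pvIns_take (a : Int) (N : List Int) (K : Nat) :
    ((pvIns a (N.take K)).take K) = (pvIns a N).take K := by
  induction N generalizing K with
  | nil => simp
  | cons b N ih =>
    cases K with
    | zero => simp
    | succ K =>
      simp only [List.take_succ_cons, pvIns]
      split
      · simp only [List.take_succ_cons]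
        rw [ih K]
      · simp only [List.take_succ_cons]
        cases K with
        | zero => simp
        | succ K2 =>
          simp only [List.take_succ_cons]
          rw [List.take_take, Nat.min_eq_left (by omega)]

lemma pvSrt_negs_append_neg (w : List Int) (a : Int) (ha : a < 0) :
    pvSrt (pvNegs (w ++ [a])) = pvIns a (pvSrt (pvNegs w)) := by
  apply PySem.List.sorted_id_eq_of_perm_of_pairwise
  · have h1 : pvNegs (w ++ [a]) = pvNegs w ++ [a] := by
      simp [pvNegs, List.filter_append, ha]
    rw [h1]
    exact (pvIns_perm a _).trans
      (((pvSrt_perm (pvNegs w)).cons a).trans (List.perm_append_singleton a _).symm)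
  · exact pvIns_pairwise a _ (pvSrt_pairwise _)

lemma pvSkipCount_split (N P : List Int) (m : Int)
    (hN : ∀ a ∈ N, a < 0) (hP : ∀ b ∈ P, ¬ b < 0) :
    pvSkipCount (N ++ P) m = min m.toNat N.length := by
  induction N generalizing m with
  | nil =>
    cases P with
    | nil => simp [pvSkipCount]
    | cons b P' =>
      have : ¬ b < 0 := hP b (by simp)
      simp [pvSkipCount, this]
  | cons a N' ih =>
    have ha : a < 0 := hN a (by simp)
    simp only [List.cons_append, pvSkipCount]
    by_cases hm : 0 < m
    · rw [if_pos (show 0 < m ∧ a < 0 from ⟨hm, ha⟩),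
        ih _ (fun x hx => hN x (List.mem_cons_of_mem _ hx))]
      simp only [List.length_cons]
      omega
    · rw [if_neg (fun hh => hm hh.1)]
      simp only [List.length_cons]
      omega

lemma innerA_eq (w : List Int) (k : Int) :
    pvSumA (pvSrt w) (pvSkipA (pvSrt w) k 0) 0 = pvVal w k := by
  set N := pvSrt (pvNegs w) with hN
  set P := pvSrt (w.filter (fun y => !decide (y < 0))) with hP
  have hsplit : pvSrt w = N ++ P := pvSrt_split w
  have hNneg : ∀ a ∈ N, a < 0 := by
    intro a ha
    have := (PySem.List.mem_sorted _ _ _ _).1 ha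
    simpa [pvNegs] using (List.mem_filter.1 this).2
  have hPpos : ∀ b ∈ P, ¬ b < 0 := by
    intro b hb
    have := (PySem.List.mem_sorted _ _ _ _).1 hb
    simpa using (List.mem_filter.1 this).2
  have hskip : pvSkipA (pvSrt w) k 0 = ((min k.toNat N.length : Nat) : Int) := by
    rw [pvSkipA_eq _ _ 0 le_rfl]
    simp only [Int.toNat_zero, List.drop_zero, sub_zero, hsplit]
    rw [pvSkipCount_split N P k hNneg hPpos]
    omega
  have hsum : pvSumA (pvSrt w) (pvSkipA (pvSrt w) k 0) 0
      = ((pvSrt w).drop (min k.toNat N.length)).sum := by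
    rw [hskip, pvSumA_eq _ _ _ (by positivity), Int.toNat_natCast, zero_add]
  rw [hsum, hsplit, List.drop_append_of_le_length (by omega)]
  have hperm : (N ++ P).sum = w.sum := by
    have h1 : (pvSrt w).sum = w.sum := (pvSrt_perm w).sum_eq
    rw [← hsplit]; exact h1
  have htd : (N.take (min k.toNat N.length)).sum + (N.drop (min k.toNat N.length)).sum = N.sum := by
    rw [← List.sum_append, List.take_append_drop]
  have htk : (N.take k.toNat).sum = (N.take (min k.toNat N.length)).sum := by
    by_cases h : k.toNat ≤ N.length
    · rw [Nat.min_eq_left h]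
    · rw [Nat.min_eq_right (by omega), List.take_of_length_le (by omega),
        List.take_of_length_le le_rfl]
  simp only [pvVal, pvRem, ← hN, List.sum_append] at *
  omega

lemma if_gt_max (s b : Int) : (if s > b then s else b) = max s b := by
  split <;> omega

lemma stepB_core (T : List Int) (k : Int) (w : List Int) (a : Int) (best j : Int)
    (hj : PySem.List.pyGetD T j 0 = a) :
    pvStepB T k (w.sum, pvRem w k, (pvRem w k).sum, best) j
      = ((w ++ [a]).sum, pvRem (w ++ [a]) k, (pvRem (w ++ [a]) k).sum,
         max (pvVal (w ++ [a]) k) best) := by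
  have hsum : (w ++ [a]).sum = w.sum + a := by simp
  by_cases ha : a < 0
  · have hrem : pvRem (w ++ [a]) k = (pvIns a (pvSrt (pvNegs w))).take k.toNat := by
      rw [pvRem, pvSrt_negs_append_neg w a ha]
    set N := pvSrt (pvNegs w) with hNdef
    set c := N.length with hcdef
    set K := k.toNat with hKdef
    have hR : pvRem w k = N.take K := rfl
    have hlenR : (N.take K).length = min K c := by simp [hcdef]
    have hlenIns : (pvIns a (N.take K)).length = min K c + 1 := by
      rw [length_pvIns, hlenR]
    simp only [pvStepB, hj, if_pos ha, pvPosB_insert, hR]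
    by_cases hcond : ((pvIns a (N.take K)).length : Int) > k
    · have hminK : min K c = K := by
        rw [hlenIns] at hcond
        omega
      have hne : pvIns a (N.take K) ≠ [] := by
        intro hh; rw [hh] at hlenIns; simp at hlenIns
      have hpop : PySem.List.pop? (pvIns a (N.take K)) (-1)
          = some ((pvIns a (N.take K)).getLast hne, (pvIns a (N.take K)).dropLast) := by
        conv_lhs => rw [← List.dropLast_append_getLast hne]
        exact PySem.List.pop?_last _ _
      have hdl : (pvIns a (N.take K)).dropLast = (pvIns a (N.take K)).take K := by
        rw [List.dropLast_eq_take, hlenIns, hminK, Nat.add_sub_cancel]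
      have hremm : (pvIns a (N.take K)).take K = (pvIns a N).take K := take_pvIns_take a N K
      have hsumdl : ((pvIns a (N.take K)).dropLast).sum
          = (N.take K).sum + a - (pvIns a (N.take K)).getLast hne := by
        have h1 : ((pvIns a (N.take K)).dropLast).sum + (pvIns a (N.take K)).getLast hne
            = (pvIns a (N.take K)).sum := by
          conv_rhs => rw [← List.dropLast_append_getLast hne]
          simp
        rw [sum_pvIns] at h1
        omega
      rw [if_pos hcond, hpop]
      simp only [Prod.mk.injEq]
      refine ⟨hsum.symm, ?_, ?_, ?_⟩
      · rw [hrem, ← hremm, ← hdl]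
      · rw [hrem, ← hremm, ← hdl, hsumdl]
      · rw [if_gt_max]
        congr 1
        show _ = (w ++ [a]).sum - (pvRem (w ++ [a]) k).sum
        rw [hsum, hrem, ← hremm, ← hdl, hsumdl]
    · have hcK : c < K := by
        rw [hlenIns] at hcond
        omega
      have hRN : N.take K = N := List.take_of_length_le (by omega)
      have htk : (pvIns a N).take K = pvIns a N :=
        List.take_of_length_le (by rw [length_pvIns]; omega)
      rw [if_neg hcond]
      simp only [Prod.mk.injEq]
      refine ⟨hsum.symm, ?_, ?_, ?_⟩
      · rw [hrem, htk, hRN]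
      · rw [hrem, htk, hRN, sum_pvIns]
        ring
      · rw [if_gt_max]
        congr 1
        show _ = (w ++ [a]).sum - (pvRem (w ++ [a]) k).sum
        rw [hsum, hrem, htk, hRN, sum_pvIns]
        ring
  · have hnegs : pvNegs (w ++ [a]) = pvNegs w := by
      simp [pvNegs, List.filter_append, ha]
    have hrem : pvRem (w ++ [a]) k = pvRem w k := by
      simp [pvRem, hnegs]
    simp only [pvStepB, hj, if_neg ha, Prod.mk.injEq]
    refine ⟨hsum.symm, hrem.symm, by rw [hrem], ?_⟩
    rw [if_gt_max]
    congr 1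
    show _ = (w ++ [a]).sum - (pvRem (w ++ [a]) k).sum
    rw [hsum, hrem]

lemma pvRem_nil (k : Int) : pvRem [] k = [] := by
  simp [pvRem, pvSrt, pvNegs, PySem.List.sorted]

lemma innerB_fold (T : List Int) (k : Int) (i : Int) (hi : 0 ≤ i) (m : Nat)
    (hm : i + m ≤ (T.length : Int)) (b0 : Int) :
    (PySem.List.pyRange i (i + m) 1).foldl (pvStepB T k) (0, [], 0, b0)
      = (((T.drop i.toNat).take m).sum, pvRem ((T.drop i.toNat).take m) k,
         (pvRem ((T.drop i.toNat).take m) k).sum,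
         (List.range m).foldl
           (fun acc m' => max (pvVal ((T.drop i.toNat).take (m' + 1)) k) acc) b0) := by
  induction m with
  | zero =>
    rw [show i + ((0 : Nat) : Int) = i by omega, PySem.List.pyRange_one_eq_nil le_rfl]
    simp [pvRem_nil]
  | succ m ih =>
    have hd : m < (T.drop i.toNat).length := by
      simp only [List.length_drop]
      omega
    have hj : PySem.List.pyGetD T (i + (m : Int)) 0 = (T.drop i.toNat)[m] := by
      rw [PySem.List.pyGetD_eq_getElem T 0 (by omega) (by omega)]
      rw [List.getElem_drop]
      congr 1
      omega
    have htake : (T.drop i.toNat).take (m + 1)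
        = (T.drop i.toNat).take m ++ [(T.drop i.toNat)[m]] := by
      rw [List.take_add_one]
      simp [List.getElem?_eq_getElem hd]
    rw [show i + ((m + 1 : Nat) : Int) = (i + (m : Int)) + 1 by push_cast; ring,
      PySem.List.pyRange_one_succ_right (by omega), List.foldl_append, ih (by push_cast at hm; omega),
      List.foldl_cons, List.foldl_nil,
      stepB_core T k ((T.drop i.toNat).take m) ((T.drop i.toNat)[m]) _ _ hj, ← htake,
      List.range_succ, List.foldl_append, List.foldl_cons, List.foldl_nil]


theorem main_eq (T : List Int) (k : Int) : kstrong_brut T k = kstrong_brut_alt T k := by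
  simp only [kstrong_brut, kstrong_brut_alt]
  apply PySem.List.foldl_congr_mem
  intro acc i hi
  obtain ⟨hi0, hin⟩ := (PySem.List.mem_pyRange_one).1 hi
  set m : Nat := T.length - i.toNat with hmdef
  have hAeq : (PySem.List.pyRange (i + 1) ((T.length : Int) + 1) 1).foldl
      (fun maxsum j =>
        max (pvSumA (PySem.List.sorted (PySem.List.slice T (some i) (some j)) (fun y => y) false)
          (pvSkipA (PySem.List.sorted (PySem.List.slice T (some i) (some j)) (fun y => y) false) k 0) 0)
          maxsum) acc
      = (List.range m).foldl
          (fun acc2 m' => max (pvVal ((T.drop i.toNat).take (m' + 1)) k) acc2) acc := by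
    have hA1 : PySem.List.pyRange (i + 1) ((T.length : Int) + 1) 1
        = (List.range m).map (fun (m' : Nat) => (i + 1) + (m' : Int)) := by
      rw [PySem.List.pyRange_one]
      congr 1
      congr 1
      omega
    rw [hA1, List.foldl_map]
    apply PySem.List.foldl_congr_mem
    intro acc2 m' hm'
    have hm2 := List.mem_range.1 hm'
    have hslice : PySem.List.slice T (some i) (some ((i + 1) + (m' : Int)))
        = (T.drop i.toNat).take (m' + 1) := by
      rw [PySem.List.slice_toNat T (by omega) (by omega)]
      congr 1
      omega
    rw [hslice]
    have hinner := innerA_eq ((T.drop i.toNat).take (m' + 1)) k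
    simp only [pvSrt] at hinner
    rw [hinner]
  have hBeq : ((PySem.List.pyRange i ((T.length : Int)) 1).foldl (pvStepB T k)
        (0, [], 0, acc)).2.2.2
      = (List.range m).foldl
          (fun acc2 m' => max (pvVal ((T.drop i.toNat).take (m' + 1)) k) acc2) acc := by
    have h2 : (T.length : Int) = i + (m : Int) := by omega
    rw [h2, innerB_fold T k i hi0 m (by omega) acc]
  rw [hAeq, hBeq]

-- ===== VERDICT (by name: the statement is the Claim_ definition above) =====
theorem kstrong_brut_spec : Claim_equal_kstrong_brut := by
  intro T k _
  unfold Spec_kstrong_brut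
  exact main_eq T k
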